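-- pv_equiv track=rewrite | github.com/miliar/Code_Jam_Webscraper | solutions_python/Problem_201/186.py | f
-- ===== SOURCE A (Python) =====
-- def f(n, k):
--     n -= 1
--     if k == 1:
--         return (n + 1) // 2, (n // 2)
--
--     k -= 1
--     if n % 2 == 0:
--         return f(n // 2, (k + 1) // 2)
--
--     if k % 2 == 0:
--         return f(n // 2, k // 2)
--
--     return f((n + 1) // 2, (k + 1) // 2)
-- ===== SOURCE B (Python) =====
-- def f(n, k):
--     # while-loop state machine: hoisted k==1 test, then one (n,k) transition per round
--     while k != 1:
--         n -= 1
--         k -= 1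
--         if n % 2 == 0:
--             n, k = n // 2, (k + 1) // 2
--         elif k % 2 == 0:
--             n, k = n // 2, k // 2
--         else:
--             n, k = (n + 1) // 2, (k + 1) // 2
--     n -= 1
--     return (n + 1) // 2, n // 2
-- ===== Notes on version B (the rewrite author's own statement) =====
-- stated objective: alternative
-- what changed: A's tail recursion is replaced by an explicit while-loop state machine: the k==1 test is hoisted into the loop condition, each round applies one (n,k) transition in place, and the base-case gap formula is applied once after the loop.
import Mathlib
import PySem

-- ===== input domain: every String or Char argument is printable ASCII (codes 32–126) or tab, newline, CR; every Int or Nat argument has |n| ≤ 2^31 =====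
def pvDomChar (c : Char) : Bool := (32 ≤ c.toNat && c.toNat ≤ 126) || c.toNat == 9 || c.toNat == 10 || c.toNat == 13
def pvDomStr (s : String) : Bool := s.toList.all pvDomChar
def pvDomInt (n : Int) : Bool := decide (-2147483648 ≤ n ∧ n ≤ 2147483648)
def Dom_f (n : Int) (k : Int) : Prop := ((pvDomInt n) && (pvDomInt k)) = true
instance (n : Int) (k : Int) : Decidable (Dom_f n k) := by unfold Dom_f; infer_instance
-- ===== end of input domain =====

-- B replaces A's tail recursion by an explicit while-loop state machine (hoisted k==1 test,
-- one (n,k) transition per round, the base-case formula applied once after the loop); same cost.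


-- ===== PORT A =====
-- literal transliteration of A's recursion; the fuel only makes the (for k ≥ 1 always
-- terminating) recursion total in Lean, it never runs out on inputs satisfying Pre_f
def fAux : Nat → Int → Int → Int × Int
  | 0, _, _ => (0, 0)
  | fuel + 1, n, k =>
    let n := n - 1
    if k = 1 then (PySem.Int.floordiv (n + 1) 2, PySem.Int.floordiv n 2)
    else
      let k := k - 1
      if PySem.Int.mod n 2 = 0 then
        fAux fuel (PySem.Int.floordiv n 2) (PySem.Int.floordiv (k + 1) 2)
      else if PySem.Int.mod k 2 = 0 then
        fAux fuel (PySem.Int.floordiv n 2) (PySem.Int.floordiv k 2)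
      else
        fAux fuel (PySem.Int.floordiv (n + 1) 2) (PySem.Int.floordiv (k + 1) 2)

def f (n : Int) (k : Int) : Int × Int := fAux (k.toNat + 1) n k

-- ===== PORT B =====
-- one loop round of Source B: decrement both, then the three-way reassignment
def fAltStep (s : Int × Int) : Int × Int :=
  let n := s.1 - 1
  let k := s.2 - 1
  if PySem.Int.mod n 2 = 0 then (PySem.Int.floordiv n 2, PySem.Int.floordiv (k + 1) 2)
  else if PySem.Int.mod k 2 = 0 then (PySem.Int.floordiv n 2, PySem.Int.floordiv k 2)
  else (PySem.Int.floordiv (n + 1) 2, PySem.Int.floordiv (k + 1) 2)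

-- the 'while k != 1' loop; fuel only totalises it and never runs out when k ≥ 1
def fAltLoop : Nat → Int × Int → Int × Int
  | 0, s => s
  | fuel + 1, s => if s.2 = 1 then s else fAltLoop fuel (fAltStep s)

def f_alt (n : Int) (k : Int) : Int × Int :=
  let s := fAltLoop (k.toNat + 1) (n, k)
  let m := s.1 - 1
  (PySem.Int.floordiv (m + 1) 2, PySem.Int.floordiv m 2)

-- ===== PRECONDITION & SPEC =====
-- Python A recurses forever (RecursionError) whenever k ≤ 0; Pre_f excludes exactly those inputs.
def Pre_f (n : Int) (k : Int) : Prop := 1 ≤ k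
instance (n : Int) (k : Int) : Decidable (Pre_f n k) := by unfold Pre_f; infer_instance
def pvWitness_f : Int × Int := (10, 3)

def Spec_f (n : Int) (k : Int) (out : Int × Int) : Prop := out = f_alt n k
instance (n : Int) (k : Int) (out : Int × Int) : Decidable (Spec_f n k out) := by unfold Spec_f; infer_instance

-- ===== CLAIM (what is proved, stated in full; the proofs are below) =====
def Claim_equal_f : Prop := ∀ (n : Int) (k : Int), Dom_f n k → Pre_f n k → Spec_f n k (f n k)

-- ===== LEMMAS AND PROOFS =====

-- the loop transition keeps k ≥ 1 and strictly shrinks it (for k ≥ 2)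
theorem fAltStep_k_lower {n k : Int} (hk : 2 ≤ k) :
    1 ≤ (fAltStep (n, k)).2 ∧ (fAltStep (n, k)).2 ≤ k - 1 := by
  unfold fAltStep
  simp only [PySem.Int.floordiv_eq_ediv_of_pos (by omega : (0:Int) < 2),
             PySem.Int.mod_eq_emod_of_pos (by omega : (0:Int) < 2)]
  split_ifs <;> constructor <;> simp <;> omega

-- unfolding the A-side recursion one step along the B-side transition
theorem fAux_step {fuel : Nat} {n k : Int} (hk : k ≠ 1) :
    fAux (fuel + 1) n k = fAux fuel (fAltStep (n, k)).1 (fAltStep (n, k)).2 := by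
  conv_lhs => rw [fAux]
  simp only [hk, if_false]
  unfold fAltStep
  split_ifs <;> simp_all

-- main invariant: with enough fuel on both sides, A's recursion computes the base-case
-- formula applied to the final state of B's loop
theorem main_lemma : ∀ (m : Nat) (n k : Int) (fa fb : Nat), 1 ≤ k → k.toNat ≤ m →
    m < fa → m < fb →
    fAux fa n k =
      ((PySem.Int.floordiv ((fAltLoop fb (n, k)).1 - 1 + 1) 2,
        PySem.Int.floordiv ((fAltLoop fb (n, k)).1 - 1) 2)) := by
  intro m
  induction m with
  | zero => intro n k fa fb hk hm _ _; omega
  | succ m ih =>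
    intro n k fa fb hk hm hfa hfb
    obtain ⟨fa', rfl⟩ : ∃ fa', fa = fa' + 1 := ⟨fa - 1, by omega⟩
    obtain ⟨fb', rfl⟩ : ∃ fb', fb = fb' + 1 := ⟨fb - 1, by omega⟩
    by_cases h1 : k = 1
    · subst h1
      simp [fAux, fAltLoop]
    · have hk2 : 2 ≤ k := by omega
      obtain ⟨hlo, hhi⟩ := fAltStep_k_lower (n := n) hk2
      rw [fAux_step h1]
      have : fAltLoop (fb' + 1) (n, k) = fAltLoop fb' (fAltStep (n, k)) := by
        rw [fAltLoop]; simp [h1]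
      rw [this]
      have hpair : fAltStep (n, k) = ((fAltStep (n, k)).1, (fAltStep (n, k)).2) := rfl
      rw [hpair]
      exact ih _ _ fa' fb' hlo (by omega) (by omega) (by omega)

-- ===== VERDICT (by name: the statement is the Claim_ definition above) =====
theorem f_spec : Claim_equal_f := by
  intro n k _ hk
  unfold Spec_f f f_alt
  exact main_lemma k.toNat n k (k.toNat + 1) (k.toNat + 1) hk le_rfl (by omega) (by omega)
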